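-- pv_equiv track=rewrite | github.com/Muratjan99/neoromesh_test | q1.py | min_subsequences
-- ===== SOURCE A (Python) =====
-- def min_subsequences(source, target):
--     source_len, target_len = len(source), len(target)
--     source_i, target_i, subsequences_count = 0, 0, 0
--     # 从source的第一个字符开始，依次匹配target的字符
--     while target_i < target_len:
--         # 记录当前target的索引
--         current_target_i = target_i
--         while target_i < target_len and source_i < source_len:
--             # 如果匹配成功，source和target的指针都向后移动一位
--             if source[source_i] == target[target_i]:
--                 target_i += 1
--             source_i += 1
--         # 如果source的指针到达末尾，但是target的指针没有到达末尾，返回-1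
--         if current_target_i == target_i:
--             return -1
--         subsequences_count += 1
--         source_i = 0
--     return subsequences_count
-- ===== SOURCE B (Python) =====
-- def _bsearch(lst, x):
--     # leftmost index k with lst[k] >= x (lst sorted ascending)
--     lo, hi = 0, len(lst)
--     while lo < hi:
--         mid = (lo + hi) // 2
--         if lst[mid] < x:
--             lo = mid + 1
--         else:
--             hi = mid
--     return lo
--
--
-- def min_subsequences(source, target):
--     # Build once: char -> increasing list of its positions in source.
--     idx = {}
--     for i, c in enumerate(source):
--         idx.setdefault(c, []).append(i)
--     if not target:
--         return 0
--     passes, cur = 1, 0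
--     for c in target:
--         lst = idx.get(c)
--         if lst is None:
--             return -1
--         k = _bsearch(lst, cur)
--         if k == len(lst):
--             passes += 1
--             cur = lst[0] + 1
--         else:
--             cur = lst[k] + 1
--     return passes
-- ===== Notes on version B (the rewrite author's own statement) =====
-- stated objective: alternative
-- what changed: A re-walks source index by index in nested while loops (a full scan per pass); B builds a char->sorted-positions index of source once, then for each target char binary-searches that list for the next usable position, so the inner scan over source disappears.
import Mathlib
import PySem

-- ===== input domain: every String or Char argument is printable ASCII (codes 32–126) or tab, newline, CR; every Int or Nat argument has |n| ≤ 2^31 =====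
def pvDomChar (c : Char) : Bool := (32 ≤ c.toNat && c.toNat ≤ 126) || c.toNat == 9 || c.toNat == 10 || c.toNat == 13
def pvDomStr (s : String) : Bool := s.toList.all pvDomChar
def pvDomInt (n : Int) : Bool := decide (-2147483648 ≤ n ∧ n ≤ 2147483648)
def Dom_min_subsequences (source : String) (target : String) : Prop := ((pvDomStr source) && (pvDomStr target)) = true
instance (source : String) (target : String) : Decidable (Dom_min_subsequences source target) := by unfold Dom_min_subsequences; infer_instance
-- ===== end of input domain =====

-- B builds a char -> sorted-positions index of source once and binary-searches it per
-- target char, replacing A's nested index-walking scans of source; objective: alternative.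

-- ===== PORT A =====
-- A's inner while loop: walks source_i, advancing target_i on each match; returns the final
-- target_i.  The structural fuel argument only makes the recursion total: it is called with
-- fuel = number of remaining source indices, so it never runs out while source_i < len(source).
def pvInnerA (s t : List Char) : Nat → Nat → Nat → Nat
  | 0, _, ti => ti
  | fuel + 1, si, ti =>
    if h : ti < t.length ∧ si < s.length then
      if s[si] = t[ti] then pvInnerA s t fuel (si + 1) (ti + 1)
      else pvInnerA s t fuel (si + 1) ti
    else ti

-- A's outer while loop: one iteration per pass over source; fuel = bound on the number of
-- passes (target_i strictly increases each pass, so t.length + 1 passes always suffice)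
def pvOuterA (s t : List Char) : Nat → Nat → Int → Int
  | 0, _, count => count
  | fuel + 1, ti, count =>
    if ti < t.length then
      let ti' := pvInnerA s t s.length 0 ti
      if ti' = ti then -1 else pvOuterA s t fuel ti' (count + 1)
    else count

def min_subsequences (source : String) (target : String) : Int :=
  pvOuterA source.toList target.toList (target.toList.length + 1) 0 0

-- ===== PORT B =====
-- Source B's index-building loop: for i, c in enumerate(source): idx.setdefault(c, []).append(i)
def pvBuildIdx (s : List Char) : PySem.Dict Char (List Int) :=
  (PySem.List.enumerate s).foldl (fun d p => d.modify p.2 [] (· ++ [p.1])) PySem.Dict.empty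

-- Source B's _bsearch: while lo < hi with mid = (lo+hi)//2 (lo, hi stay nonnegative, so
-- Python's // is Nat division here); lst[mid] is in range whenever read, so getD is exact
def pvBsearch (lst : List Int) (x : Int) (lo hi : Nat) : Nat :=
  if lo < hi then
    let mid := (lo + hi) / 2
    if lst.getD mid 0 < x then pvBsearch lst x (mid + 1) hi
    else pvBsearch lst x lo mid
  else lo
termination_by hi - lo
decreasing_by all_goals omega

-- Source B's for-loop over target with state (cur, passes); lst[0]/lst[k] are in range
-- whenever read (a present key has a nonempty list, k < len(lst)), so getD is exact
def pvGoB (idx : PySem.Dict Char (List Int)) : List Char → Int → Int → Int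
  | [], _, passes => passes
  | c :: rest, cur, passes =>
    match idx.get? c with
    | none => -1
    | some lst =>
      let k := pvBsearch lst cur 0 lst.length
      if k = lst.length then pvGoB idx rest (lst.getD 0 0 + 1) (passes + 1)
      else pvGoB idx rest (lst.getD k 0 + 1) passes

def min_subsequences_alt (source : String) (target : String) : Int :=
  let idx := pvBuildIdx source.toList
  if target.toList = [] then 0 else pvGoB idx target.toList 0 1

-- ===== PRECONDITION & SPEC =====
def Spec_min_subsequences (source : String) (target : String) (out : Int) : Prop := out = min_subsequences_alt source target
instance (source : String) (target : String) (out : Int) : Decidable (Spec_min_subsequences source target out) := by unfold Spec_min_subsequences; infer_instance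

-- ===== CLAIM (what is proved, stated in full; the proofs are below) =====
def Claim_equal_min_subsequences : Prop := ∀ (source : String) (target : String), Dom_min_subsequences source target → Spec_min_subsequences source target (min_subsequences source target)

-- ===== LEMMAS AND PROOFS =====

-- first index j ≥ si with s[j] = c: the common reference for both ports' searches
def pvFF (s : List Char) (c : Char) (si : Nat) : Option Nat :=
  ((s.drop si).findIdx? (· == c)).map (si + ·)

theorem pvFF_lt_length (s : List Char) (c : Char) (si j : Nat) (h : pvFF s c si = some j) :
    si ≤ j ∧ j < s.length ∧ s[j]? = some c ∧ ∀ i, si ≤ i → i < j → s[i]? ≠ some c := by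
  unfold pvFF at h
  cases hf : (s.drop si).findIdx? (· == c) with
  | none => simp [hf] at h
  | some k =>
    simp only [hf, Option.map_some, Option.some.injEq] at h
    subst h
    rw [List.findIdx?_eq_some_iff_getElem] at hf
    obtain ⟨hk, hpk, hmin⟩ := hf
    rw [List.length_drop] at hk
    have hj : si + k < s.length := by omega
    refine ⟨by omega, hj, ?_, ?_⟩
    · rw [List.getElem?_eq_getElem hj]
      rw [List.getElem_drop] at hpk
      simpa using hpk
    · intro i hsi hij hc
      have hil : i < s.length := by omega
      rw [List.getElem?_eq_getElem hil] at hc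
      have hc' : s[i]'hil = c := Option.some.inj hc
      have := hmin (i - si) (by omega)
      rw [List.getElem_drop] at this
      have heq : s[si + (i - si)]'(by omega) = s[i]'hil := by congr 1; omega
      rw [heq, hc'] at this
      simp at this

theorem pvFF_none (s : List Char) (c : Char) (si : Nat) (h : pvFF s c si = none) :
    ∀ i, si ≤ i → s[i]? ≠ some c := by
  unfold pvFF at h
  simp only [Option.map_eq_none_iff, List.findIdx?_eq_none_iff] at h
  intro i hi hc
  have hlt : i < s.length := by
    by_contra hge
    simp [List.getElem?_eq_none (by omega : s.length ≤ i)] at hc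
  have hc' : s[i]'hlt = c := by
    rw [List.getElem?_eq_getElem hlt] at hc; exact Option.some.inj hc
  have hmem : s[i]'hlt ∈ s.drop si := by
    rw [List.mem_iff_getElem]
    exact ⟨i - si, by rw [List.length_drop]; omega, by rw [List.getElem_drop]; congr 1; omega⟩
  have := h _ hmem
  rw [hc'] at this
  simp at this

-- converse: the least matching index at or after si is what pvFF returns
theorem pvFF_eq_some (s : List Char) (c : Char) (si j : Nat)
    (hj : si ≤ j) (_hjl : j < s.length) (hc : s[j]? = some c)
    (hmin : ∀ i, si ≤ i → i < j → s[i]? ≠ some c) : pvFF s c si = some j := by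
  cases hf : pvFF s c si with
  | none => exact absurd hc (pvFF_none s c si hf j hj)
  | some j' =>
    obtain ⟨h1, h2, h3, h4⟩ := pvFF_lt_length s c si j' hf
    congr 1
    rcases Nat.lt_trichotomy j' j with h | h | h
    · exact absurd h3 (hmin j' h1 h)
    · exact h
    · exact absurd hc (h4 j hj h)

-- step law for pvFF
theorem pvFF_step (s : List Char) (c : Char) (si : Nat) (h : si < s.length) :
    pvFF s c si = if s[si] = c then some si else pvFF s c (si + 1) := by
  unfold pvFF
  rw [List.drop_eq_getElem_cons h, List.findIdx?_cons]
  split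
  · next hc => simp_all
  · next hc =>
    simp only [beq_iff_eq] at hc
    rw [if_neg hc]
    cases (s.drop (si+1)).findIdx? (· == c)
    · simp
    · simp
      omega

theorem pvFF_len (s : List Char) (c : Char) (si : Nat) (h : s.length ≤ si) :
    pvFF s c si = none := by
  unfold pvFF
  rw [List.drop_eq_nil_of_le h]
  simp

theorem pvFF_zero_none (s : List Char) (c : Char) : pvFF s c 0 = none ↔ c ∉ s := by
  constructor
  · intro h hc
    obtain ⟨i, hi, hgi⟩ := List.mem_iff_getElem.mp hc
    exact pvFF_none s c 0 h i (Nat.zero_le i) (by rw [List.getElem?_eq_getElem hi, hgi])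
  · intro h
    cases hf : pvFF s c 0 with
    | none => rfl
    | some j =>
      obtain ⟨-, hj, hgj, -⟩ := pvFF_lt_length s c 0 j hf
      exact absurd (List.mem_iff_getElem?.mpr ⟨j, hgj⟩) h

-- ---- B-side characterisation: the positions list and the dict that stores it ----

-- the increasing list of positions of c in s, as Source B's idx stores it
def pvPos (s : List Char) (c : Char) : List Int :=
  ((((PySem.List.enumerate s).map Prod.swap).filter (fun p => p.1 == c)).map (·.2))

theorem pvBuildIdx_getD (s : List Char) (c : Char) :
    (pvBuildIdx s).getD c [] = pvPos s c := by
  unfold pvBuildIdx pvPos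
  have h := PySem.Dict.getD_foldl_modify_append ((PySem.List.enumerate s).map Prod.swap)
    PySem.Dict.empty c
  rw [List.foldl_map] at h
  simpa using h

theorem pvBuildIdx_get?_none (s : List Char) (c : Char) :
    (pvBuildIdx s).get? c = none ↔ c ∉ s := by
  rw [PySem.Dict.get?_eq_none_iff_not_mem_keys]
  have h := PySem.Dict.keys_foldl_modify_key (PySem.List.enumerate s)
    (fun p => p.2) [] (fun _ p => (· ++ [p.1])) PySem.Dict.empty
  rw [PySem.List.map_snd_enumerate] at h
  have hkeys : (pvBuildIdx s).keys = PySem.Set.update PySem.Dict.empty.keys s := h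
  rw [hkeys]
  simp [PySem.Set.mem_update, PySem.Dict.keys_empty]

theorem pvPos_mem (s : List Char) (c : Char) (j : Int) :
    j ∈ pvPos s c ↔ ∃ (k : Nat) (h : k < s.length), j = (k : Int) ∧ s[k] = c := by
  unfold pvPos
  simp only [List.mem_map, List.mem_filter, beq_iff_eq]
  constructor
  · rintro ⟨⟨a, b⟩, ⟨⟨⟨i, ch⟩, hmem, hsw⟩, hc⟩, hb⟩
    obtain ⟨k, hk, hp⟩ := (PySem.List.mem_enumerate_iff ..).mp hmem
    cases hp
    cases hsw
    exact ⟨k, hk, by simp_all⟩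
  · rintro ⟨k, hk, hj, hc⟩
    refine ⟨((0 : Int) + k, s[k]).swap, ⟨⟨((0 : Int) + k, s[k]), ?_, rfl⟩, ?_⟩, ?_⟩
    · exact (PySem.List.mem_enumerate_iff ..).mpr ⟨k, hk, rfl⟩
    · simpa using hc
    · simp [hj]

theorem pvPos_sorted (s : List Char) (c : Char) : (pvPos s c).Pairwise (· < ·) := by
  unfold pvPos
  rw [List.pairwise_map]
  apply List.Pairwise.filter
  rw [List.pairwise_map]
  exact (PySem.List.pairwise_lt_enumerate s 0).imp (fun {a b} h => by simpa using h)

theorem pvPos_ne_nil (s : List Char) (c : Char) (h : c ∈ s) : pvPos s c ≠ [] := by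
  obtain ⟨i, hi, hgi⟩ := List.mem_iff_getElem.mp h
  have : ((i : Nat) : Int) ∈ pvPos s c := (pvPos_mem s c i).mpr ⟨i, hi, rfl, hgi⟩
  exact List.ne_nil_of_mem this

theorem pvBuildIdx_get?_some (s : List Char) (c : Char) (lst : List Int)
    (h : (pvBuildIdx s).get? c = some lst) : lst = pvPos s c ∧ c ∈ s := by
  have hc : c ∈ s := by
    by_contra hn
    rw [(pvBuildIdx_get?_none s c).mpr hn] at h
    simp at h
  have := pvBuildIdx_getD s c
  rw [PySem.Dict.getD_eq_get?_getD, h] at this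
  exact ⟨this, hc⟩

-- ---- binary search: Source B's _bsearch finds the leftmost element ≥ x ----

theorem pvBsearch_spec (lst : List Int) (x : Int) (lo hi : Nat)
    (hs : lst.Pairwise (· < ·)) (hlohi : lo ≤ hi) (hhl : hi ≤ lst.length)
    (hlo : ∀ i (h : i < lst.length), i < lo → lst[i] < x)
    (hhi : ∀ i (h : i < lst.length), hi ≤ i → x ≤ lst[i]) :
    pvBsearch lst x lo hi ≤ lst.length ∧
    (∀ i (h : i < lst.length), i < pvBsearch lst x lo hi → lst[i] < x) ∧
    (∀ i (h : i < lst.length), pvBsearch lst x lo hi ≤ i → x ≤ lst[i]) := by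
  induction lo, hi using pvBsearch.induct lst x with
  | case1 lo hi hlt mid hmid ih =>
    have hmid' : lst.getD ((lo + hi) / 2) 0 < x := hmid
    rw [pvBsearch]
    simp only [if_pos hlt, if_pos hmid']
    have hmidl : (lo + hi) / 2 < lst.length := by omega
    rw [List.getD_eq_getElem lst 0 hmidl] at hmid'
    refine ih (by omega) hhl ?_ hhi
    intro i hil hi1
    rcases Nat.lt_or_ge i ((lo + hi) / 2) with h | h
    · calc lst[i] < lst[(lo + hi) / 2] := List.pairwise_iff_getElem.mp hs i _ hil hmidl h
        _ < x := hmid'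
    · have : i = (lo + hi) / 2 := by omega
      subst this; exact hmid'
  | case2 lo hi hlt mid hmid ih =>
    have hmid' : ¬ lst.getD ((lo + hi) / 2) 0 < x := hmid
    rw [pvBsearch]
    simp only [if_pos hlt, if_neg hmid']
    have hmidl : (lo + hi) / 2 < lst.length := by omega
    rw [List.getD_eq_getElem lst 0 hmidl] at hmid'
    push Not at hmid'
    refine ih (by omega) (by omega) hlo ?_
    intro i hil hi1
    calc x ≤ lst[(lo + hi) / 2] := hmid'
      _ ≤ lst[i] := by
        rcases Nat.lt_or_ge ((lo + hi) / 2) i with h' | h'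
        · exact le_of_lt (List.pairwise_iff_getElem.mp hs _ i hmidl hil h')
        · have : (lo + hi) / 2 = i := by omega
          subst this; exact le_refl _
  | case3 lo hi hge =>
    rw [pvBsearch, if_neg hge]
    exact ⟨by omega, fun i h hi1 => hlo i h (by omega), fun i h hi1 => hhi i h (by omega)⟩

-- ---- the bridge: dict lookup + binary search compute exactly pvFF ----

theorem pvBridge (s : List Char) (c : Char) (si : Nat) (lst : List Int)
    (hl : lst = pvPos s c) :
    pvBsearch lst (si : Int) 0 lst.length ≤ lst.length ∧
    (pvBsearch lst (si : Int) 0 lst.length < lst.length →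
       ∃ j : Nat, pvFF s c si = some j ∧ lst.getD (pvBsearch lst (si : Int) 0 lst.length) 0 = (j : Int)) ∧
    (pvBsearch lst (si : Int) 0 lst.length = lst.length → pvFF s c si = none) := by
  have hs : lst.Pairwise (· < ·) := by rw [hl]; exact pvPos_sorted s c
  obtain ⟨hk, hbelow, habove⟩ := pvBsearch_spec lst (si : Int) 0 lst.length hs
    (Nat.zero_le _) (le_refl _) (fun i h hi => absurd hi (Nat.not_lt_zero i))
    (fun i h hi => absurd h (by omega))
  set k := pvBsearch lst (si : Int) 0 lst.length with hkdef
  refine ⟨hk, ?_, ?_⟩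
  · intro hklt
    have hmemk : lst[k] ∈ pvPos s c := by rw [← hl]; exact List.getElem_mem hklt
    obtain ⟨m, hm, hmj, hmc⟩ := (pvPos_mem s c lst[k]).mp hmemk
    refine ⟨m, ?_, by rw [List.getD_eq_getElem lst 0 hklt, hmj]⟩
    have hsim : si ≤ m := by
      have := habove k hklt (le_refl k)
      omega
    refine pvFF_eq_some s c si m hsim hm (by rw [List.getElem?_eq_getElem hm, hmc]) ?_
    intro i hsi him hci
    have hil : i < s.length := by omega
    have hci' : s[i]'hil = c := by rw [List.getElem?_eq_getElem hil] at hci; exact Option.some.inj hci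
    have hmem : ((i : Nat) : Int) ∈ lst := by
      rw [hl]; exact (pvPos_mem s c i).mpr ⟨i, hil, rfl, hci'⟩
    obtain ⟨m', hm', hgm'⟩ := List.mem_iff_getElem.mp hmem
    rcases Nat.lt_or_ge m' k with h | h
    · have := hbelow m' hm' h
      omega
    · have : lst[k] ≤ lst[m'] := by
        rcases Nat.lt_or_ge k m' with h' | h'
        · exact le_of_lt (List.pairwise_iff_getElem.mp hs k m' hklt hm' h')
        · have : k = m' := by omega
          subst this; exact le_refl _
      omega
  · intro hkeq
    cases hf : pvFF s c si with
    | none => rfl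
    | some j =>
      obtain ⟨hsij, hjl, hjc, -⟩ := pvFF_lt_length s c si j hf
      have hjc' : s[j]'hjl = c := by rw [List.getElem?_eq_getElem hjl] at hjc; exact Option.some.inj hjc
      have hmem : ((j : Nat) : Int) ∈ lst := by
        rw [hl]; exact (pvPos_mem s c j).mpr ⟨j, hjl, rfl, hjc'⟩
      obtain ⟨m, hm, hgm⟩ := List.mem_iff_getElem.mp hmem
      have := hbelow m hm (by omega)
      omega

-- wrap-around: the list head is the first occurrence from position 0
theorem pvHead (s : List Char) (c : Char) (lst : List Int) (hl : lst = pvPos s c)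
    (hne : lst ≠ []) : ∃ j : Nat, pvFF s c 0 = some j ∧ lst.getD 0 0 = (j : Int) := by
  have hs : lst.Pairwise (· < ·) := by rw [hl]; exact pvPos_sorted s c
  have h0 : 0 < lst.length := List.length_pos_iff.mpr hne
  have hmem0 : lst[0] ∈ pvPos s c := by rw [← hl]; exact List.getElem_mem h0
  obtain ⟨m, hm, hmj, hmc⟩ := (pvPos_mem s c lst[0]).mp hmem0
  refine ⟨m, ?_, by rw [List.getD_eq_getElem lst 0 h0, hmj]⟩
  refine pvFF_eq_some s c 0 m (Nat.zero_le m) hm (by rw [List.getElem?_eq_getElem hm, hmc]) ?_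
  intro i _ him hci
  have hil : i < s.length := by omega
  have hci' : s[i]'hil = c := by rw [List.getElem?_eq_getElem hil] at hci; exact Option.some.inj hci
  have hmem : ((i : Nat) : Int) ∈ lst := by
    rw [hl]; exact (pvPos_mem s c i).mpr ⟨i, hil, rfl, hci'⟩
  obtain ⟨m', hm', hgm'⟩ := List.mem_iff_getElem.mp hmem
  rcases Nat.eq_zero_or_pos m' with h | h
  · subst h; omega
  · have := List.pairwise_iff_getElem.mp hs 0 m' h0 hm' h
    omega

-- ---- A-side loop lemmas ----

-- the inner loop never moves target_i backwards
theorem pvInnerA_ge (s t : List Char) (fuel si ti : Nat) : ti ≤ pvInnerA s t fuel si ti := by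
  induction fuel generalizing si ti with
  | zero => exact le_refl ti
  | succ fuel ih =>
    rw [pvInnerA]
    split
    · split
      · have := ih (si + 1) (ti + 1); omega
      · exact ih (si + 1) ti
    · exact le_refl ti

-- exhausted target index: the inner loop is the identity
theorem pvInnerA_done (s t : List Char) (fuel si ti : Nat) (h : t.length ≤ ti) :
    pvInnerA s t fuel si ti = ti := by
  cases fuel with
  | zero => rw [pvInnerA]
  | succ fuel => rw [pvInnerA, dif_neg (by omega)]

-- A's inner loop skips straight to the first match of the current target char
theorem pvInnerA_cons (s t : List Char) (fuel si ti : Nat) (hti : ti < t.length)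
    (hsi : si ≤ s.length) (hF : s.length ≤ fuel + si) :
    pvInnerA s t fuel si ti =
      match pvFF s (t[ti]'hti) si with
      | some j => pvInnerA s t (fuel - (j + 1 - si)) (j + 1) (ti + 1)
      | none => ti := by
  induction fuel generalizing si with
  | zero =>
    rw [pvFF_len s _ si (by omega), pvInnerA]
  | succ fuel ih =>
    rcases Nat.lt_or_ge si s.length with hlt | hge
    · rw [pvFF_step s _ si hlt, pvInnerA, dif_pos ⟨hti, hlt⟩]
      by_cases hc : s[si] = t[ti]'hti
      · rw [if_pos hc, if_pos hc]
        show pvInnerA s t fuel (si + 1) (ti + 1) = pvInnerA s t (fuel + 1 - (si + 1 - si)) (si + 1) (ti + 1)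
        congr 1
        omega
      · rw [if_neg hc, if_neg hc, ih (si + 1) (by omega) (by omega)]
        cases hf : pvFF s (t[ti]'hti) (si + 1) with
        | none => rfl
        | some j =>
          obtain ⟨hj1, -, -, -⟩ := pvFF_lt_length s _ (si + 1) j hf
          show pvInnerA s t (fuel - (j + 1 - (si + 1))) (j + 1) (ti + 1) = pvInnerA s t (fuel + 1 - (j + 1 - si)) (j + 1) (ti + 1)
          congr 1
          omega
    · rw [pvFF_len s _ si hge, pvInnerA, dif_neg (by omega)]

-- ---- the bisimulation: resuming A mid-pass at (si, ti) equals B on the rest of target ----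

theorem pvMain (s t : List Char) (ofuel ifuel ti si : Nat) (cnt : Int)
    (hti : ti ≤ t.length) (hsi : si ≤ s.length)
    (hIF : s.length ≤ ifuel + si) (hOF : t.length < ofuel + ti) :
    pvOuterA s t ofuel (pvInnerA s t ifuel si ti) cnt = pvGoB (pvBuildIdx s) (t.drop ti) (si : Int) cnt := by
  rcases Nat.lt_or_ge ti t.length with hlt | hge
  · have hdrop : t.drop ti = t[ti]'hlt :: t.drop (ti + 1) := List.drop_eq_getElem_cons hlt
    rw [pvInnerA_cons s t ifuel si ti hlt hsi hIF, hdrop]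
    set c := t[ti]'hlt with hcdef
    rw [pvGoB]
    cases hg : (pvBuildIdx s).get? c with
    | none =>
      have hcs : c ∉ s := (pvBuildIdx_get?_none s c).mp hg
      have hff0 : pvFF s c 0 = none := (pvFF_zero_none s c).mpr hcs
      have hffsi : pvFF s c si = none := by
        cases hf : pvFF s c si with
        | none => rfl
        | some j =>
          obtain ⟨-, hjl, hjc, -⟩ := pvFF_lt_length s c si j hf
          exact absurd (List.mem_iff_getElem?.mpr ⟨j, hjc⟩) hcs
      rw [hffsi]
      simp only []
      cases ofuel with
      | zero => omega
      | succ ofu =>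
        rw [pvOuterA, if_pos hlt]
        rw [pvInnerA_cons s t s.length 0 ti hlt (Nat.zero_le _) (by omega), hff0]
        simp
    | some lst =>
      obtain ⟨hl, hcs⟩ := pvBuildIdx_get?_some s c lst hg
      have hne : lst ≠ [] := hl ▸ pvPos_ne_nil s c hcs
      obtain ⟨hkle, hBlt, hBeq⟩ := pvBridge s c si lst hl
      simp only []
      by_cases hk : pvBsearch lst (si : Int) 0 lst.length = lst.length
      · -- wrap: no occurrence at or after si; A stalls, the outer loop restarts a pass
        rw [if_pos hk, hBeq hk]
        simp only []
        cases ofuel with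
        | zero => omega
        | succ ofu =>
          rw [pvOuterA, if_pos hlt]
          obtain ⟨j0, hff0, hget0⟩ := pvHead s c lst hl hne
          rw [pvInnerA_cons s t s.length 0 ti hlt (Nat.zero_le _) (by omega), hff0]
          obtain ⟨-, hj0l, -, -⟩ := pvFF_lt_length s c 0 j0 hff0
          simp only []
          have hge1 := pvInnerA_ge s t (s.length - (j0 + 1 - 0)) (j0 + 1) (ti + 1)
          rw [if_neg (by omega)]
          have hm := pvMain s t ofu (s.length - (j0 + 1 - 0)) (ti + 1) (j0 + 1) (cnt + 1)
            (by omega) (by omega) (by omega) (by omega)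
          rw [hget0, show ((j0 : Int) + 1) = ((j0 + 1 : Nat) : Int) by push_cast; ring]
          exact hm
      · -- a match at or after si: both sides jump to it
        rw [if_neg hk]
        obtain ⟨j, hff, hget⟩ := hBlt (by omega)
        rw [hff]
        simp only []
        obtain ⟨hsij, hjl, -, -⟩ := pvFF_lt_length s c si j hff
        have hm := pvMain s t ofuel (ifuel - (j + 1 - si)) (ti + 1) (j + 1) cnt
          (by omega) (by omega) (by omega) (by omega)
        rw [hget, show ((j : Int) + 1) = ((j + 1 : Nat) : Int) by push_cast; ring]
        exact hm
  · rw [pvInnerA_done s t ifuel si ti hge, List.drop_eq_nil_of_le (by omega), pvGoB]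
    cases ofuel with
    | zero => rw [pvOuterA]
    | succ ofu => rw [pvOuterA, if_neg (by omega)]
termination_by t.length - ti

-- ===== VERDICT (by name: the statement is the Claim_ definition above) =====
theorem min_subsequences_spec : Claim_equal_min_subsequences := by
  intro source target _
  unfold Spec_min_subsequences min_subsequences min_subsequences_alt
  set s := source.toList
  set t := target.toList
  simp only []
  by_cases ht : t = []
  · rw [if_pos ht, ht]
    rw [pvOuterA]
    simp
  · rw [if_neg ht]
    have hlen : 0 < t.length := List.length_pos_iff.mpr ht
    have hdrop : t = t[0]'hlen :: t.drop 1 := by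
      conv_lhs => rw [← List.drop_zero (l := t), List.drop_eq_getElem_cons hlen]
    set c := t[0]'hlen with hcdef
    rw [pvOuterA, if_pos hlen]
    simp only []
    rw [pvInnerA_cons s t s.length 0 0 hlen (Nat.zero_le _) (by omega)]
    conv_rhs => rw [hdrop]
    rw [pvGoB]
    cases hg : (pvBuildIdx s).get? c with
    | none =>
      have hcs : c ∉ s := (pvBuildIdx_get?_none s c).mp hg
      rw [(pvFF_zero_none s c).mpr hcs]
      simp
    | some lst =>
      obtain ⟨hl, hcs⟩ := pvBuildIdx_get?_some s c lst hg
      obtain ⟨hkle, hBlt, hBeq⟩ := pvBridge s c 0 lst hl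
      simp only [Nat.cast_zero] at hkle hBlt hBeq
      have hkne : ¬ pvBsearch lst (0 : Int) 0 lst.length = lst.length := by
        intro hk
        exact absurd hcs (by rw [← pvFF_zero_none s c]; exact hBeq hk)
      obtain ⟨j, hff, hget⟩ := hBlt (by omega)
      rw [hff]
      simp only []
      obtain ⟨-, hjl, -, -⟩ := pvFF_lt_length s c 0 j hff
      have hge1 := pvInnerA_ge s t (s.length - (j + 1 - 0)) (j + 1) (0 + 1)
      rw [if_neg (by omega), if_neg hkne, hget,
          show ((j : Int) + 1) = ((j + 1 : Nat) : Int) by push_cast; ring]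
      have hm := pvMain s t t.length (s.length - (j + 1 - 0)) (0 + 1) (j + 1) (0 + 1)
        (by omega) (by omega) (by omega) (by omega)
      simpa using hm
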